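-- pv_equiv track=rewrite | github.com/RobertOfTaiwan/SudokuStudyLib | matrix/matrix.py | GetCanNotSeenInBox
-- ===== SOURCE A (Python) =====
-- def GetCanNotSeenInBox(m, b, p1, p2):
--     """get the postions in a box(b) which can not be seen in position p1 and p2 which are in the same box
--     and those positions are not filled
--     p1, p2 must be in different x and y, p1, p2 sometime as the form (x,0)|(0,y)"""
--
--     Pos = list()
--     for i in range(1, 4):
--         for j in range(1, 4):
--             x = (b[0] - 1)*3 + i
--             y = (b[1] - 1)*3 + j
--             if x == p1[0] or x == p2[0] or y == p1[1] or y == p2[1] or m[x][y]!=0: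
--                 continue
--             Pos.append((x, y))
--     return Pos
-- ===== SOURCE B (Python) =====
-- def GetCanNotSeenInBox(m, b, p1, p2):
--     """Same result as A, built back-to-front by a recursion over a single
--     linear cell index k (divmod into box offsets) with the two forbidden
--     coordinate sets precomputed once."""
--     bad_x = {p1[0], p2[0]}
--     bad_y = {p1[1], p2[1]}
--
--     def go(k):
--         if k == 9:
--             return []
--         i, j = divmod(k, 3)
--         x = (b[0] - 1) * 3 + (i + 1)
--         y = (b[1] - 1) * 3 + (j + 1)
--         if x in bad_x or y in bad_y or m[x][y] != 0:
--             return go(k + 1)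
--         return [(x, y)] + go(k + 1)
--
--     return go(0)
-- ===== Notes on version B (the rewrite author's own statement) =====
-- stated objective: alternative
-- what changed: B replaces A's nested row/column loops with an accumulator by a recursion over a single linear cell index (divmod into box offsets) that builds the result back-to-front by consing, with the two forbidden coordinate sets precomputed once.
import Mathlib
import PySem

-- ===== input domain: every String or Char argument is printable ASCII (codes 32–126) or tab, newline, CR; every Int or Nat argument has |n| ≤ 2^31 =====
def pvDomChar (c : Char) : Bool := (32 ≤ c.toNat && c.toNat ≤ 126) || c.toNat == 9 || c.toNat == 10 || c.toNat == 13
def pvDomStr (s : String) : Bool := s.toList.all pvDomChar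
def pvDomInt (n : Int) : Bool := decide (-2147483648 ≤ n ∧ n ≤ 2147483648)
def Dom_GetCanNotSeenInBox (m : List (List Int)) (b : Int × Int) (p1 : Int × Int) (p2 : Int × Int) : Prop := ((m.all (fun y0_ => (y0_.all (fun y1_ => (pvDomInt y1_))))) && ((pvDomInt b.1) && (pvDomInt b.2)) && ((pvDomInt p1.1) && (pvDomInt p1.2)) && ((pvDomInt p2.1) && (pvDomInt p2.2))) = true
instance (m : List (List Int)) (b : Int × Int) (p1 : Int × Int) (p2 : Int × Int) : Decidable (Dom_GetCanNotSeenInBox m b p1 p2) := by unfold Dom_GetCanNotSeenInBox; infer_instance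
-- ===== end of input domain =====

-- B rebuilds the result back-to-front by recursion on a single linear cell index k
-- (divmod into box offsets), with the two forbidden coordinate sets precomputed once,
-- instead of A's nested row/column loops with an accumulator (objective: alternative).


-- m[x][y] (total form; exact on inputs admitted by Pre_, where both lookups succeed)
def pvCell (m : List (List Int)) (x y : Int) : Int :=
  (PySem.List.pyGet? ((PySem.List.pyGet? m x).getD []) y).getD 0

-- ===== PORT A =====
def GetCanNotSeenInBox (m : List (List Int)) (b : Int × Int) (p1 : Int × Int) (p2 : Int × Int) : List (Int × Int) :=
  (PySem.List.pyRange 1 4 1).foldl (fun Pos i =>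
    (PySem.List.pyRange 1 4 1).foldl (fun Pos j =>
      let x := (b.1 - 1) * 3 + i
      let y := (b.2 - 1) * 3 + j
      if x == p1.1 || x == p2.1 || y == p1.2 || y == p2.2 || pvCell m x y != 0 then Pos
      else Pos ++ [(x, y)]) Pos) []

-- ===== PORT B =====
-- go(k): recursion on the remaining cell count n = 9 - k (k = 9 - n), building back-to-front.
def pvGo (m : List (List Int)) (b : Int × Int) (badx bady : PySem.Set Int) : Nat → List (Int × Int)
  | 0 => []
  | n + 1 =>
    let k : Nat := 9 - (n + 1)
    let i : Nat := k / 3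
    let j : Nat := k % 3
    let x : Int := (b.1 - 1) * 3 + ((i : Int) + 1)
    let y : Int := (b.2 - 1) * 3 + ((j : Int) + 1)
    if PySem.Set.contains badx x || PySem.Set.contains bady y || pvCell m x y != 0 then
      pvGo m b badx bady n
    else (x, y) :: pvGo m b badx bady n

def GetCanNotSeenInBox_alt (m : List (List Int)) (b : Int × Int) (p1 : Int × Int) (p2 : Int × Int) : List (Int × Int) :=
  pvGo m b (PySem.Set.ofList [p1.1, p2.1]) (PySem.Set.ofList [p1.2, p2.2]) 9

-- ===== PRECONDITION & SPEC =====
-- Pre_ excludes exactly the inputs where Python's m[x][y] raises IndexError: every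
-- non-excluded cell of the box must be indexable (Python semantics, negative wrap allowed).
def Pre_GetCanNotSeenInBox (m : List (List Int)) (b : Int × Int) (p1 : Int × Int) (p2 : Int × Int) : Prop :=
  ∀ i ∈ PySem.List.pyRange 1 4 1, ∀ j ∈ PySem.List.pyRange 1 4 1,
    ((b.1 - 1) * 3 + i ≠ p1.1 ∧ (b.1 - 1) * 3 + i ≠ p2.1 ∧
     (b.2 - 1) * 3 + j ≠ p1.2 ∧ (b.2 - 1) * 3 + j ≠ p2.2) →
    ((PySem.List.pyGet? m ((b.1 - 1) * 3 + i)).bind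
      (fun row => PySem.List.pyGet? row ((b.2 - 1) * 3 + j))).isSome
instance (m : List (List Int)) (b : Int × Int) (p1 : Int × Int) (p2 : Int × Int) : Decidable (Pre_GetCanNotSeenInBox m b p1 p2) := by unfold Pre_GetCanNotSeenInBox; infer_instance

def pvWitness_GetCanNotSeenInBox : List (List Int) × (Int × Int) × (Int × Int) × (Int × Int) :=
  ([[0,0,0,0],[0,1,0,0],[0,0,2,0],[0,0,0,0]], (1, 1), (1, 1), (2, 2))

def Spec_GetCanNotSeenInBox (m : List (List Int)) (b : Int × Int) (p1 : Int × Int) (p2 : Int × Int) (out : List (Int × Int)) : Prop := out = GetCanNotSeenInBox_alt m b p1 p2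
instance (m : List (List Int)) (b : Int × Int) (p1 : Int × Int) (p2 : Int × Int) (out : List (Int × Int)) : Decidable (Spec_GetCanNotSeenInBox m b p1 p2 out) := by unfold Spec_GetCanNotSeenInBox; infer_instance

-- ===== CLAIM (what is proved, stated in full; the proofs are below) =====
def Claim_equal_GetCanNotSeenInBox : Prop := ∀ (m : List (List Int)) (b : Int × Int) (p1 : Int × Int) (p2 : Int × Int), Dom_GetCanNotSeenInBox m b p1 p2 → Pre_GetCanNotSeenInBox m b p1 p2 → Spec_GetCanNotSeenInBox m b p1 p2 (GetCanNotSeenInBox m b p1 p2)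

-- ===== LEMMAS AND PROOFS =====

-- The cell test both programs make, as an Option-producing filter (proof-only helper).
def pvKeep (m : List (List Int)) (p1 p2 : Int × Int) (x y : Int) : Option (Int × Int) :=
  if x == p1.1 || x == p2.1 || y == p1.2 || y == p2.2 || pvCell m x y != 0 then none
  else some (x, y)

-- membership in the two-element Python set is the pair of equality tests
theorem pv_contains_pair (a c x : Int) :
    PySem.Set.contains (PySem.Set.ofList [a, c]) x = (x == a || x == c) := by
  by_cases h : c = a <;>
    simp [PySem.Set.ofList, PySem.Set.add, PySem.Set.contains, PySem.Set.empty,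
      h, Bool.beq_eq_decide_eq]

-- A's inner loop over j is a filterMap, for fixed x.
theorem pv_inner_eq (m : List (List Int)) (p1 p2 : Int × Int) (x : Int)
    (fy : Int → Int) (js : List Int) (acc : List (Int × Int)) :
    js.foldl (fun Pos j =>
      if x == p1.1 || x == p2.1 || fy j == p1.2 || fy j == p2.2 || pvCell m x (fy j) != 0 then Pos
      else Pos ++ [(x, fy j)]) acc
    = acc ++ js.filterMap (fun j => pvKeep m p1 p2 x (fy j)) := by
  induction js generalizing acc with
  | nil => simp
  | cons j js ih =>
    rw [List.foldl_cons, ih, List.filterMap_cons]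
    unfold pvKeep
    split <;> simp_all

-- A's nested loops are a flatMap of filterMaps.
theorem pv_outer_eq (m : List (List Int)) (p1 p2 : Int × Int)
    (fx fy : Int → Int) (is js : List Int) (acc : List (Int × Int)) :
    is.foldl (fun Pos i =>
      js.foldl (fun Pos j =>
        if fx i == p1.1 || fx i == p2.1 || fy j == p1.2 || fy j == p2.2 ||
            pvCell m (fx i) (fy j) != 0 then Pos
        else Pos ++ [(fx i, fy j)]) Pos) acc
    = acc ++ is.flatMap (fun i => js.filterMap (fun j => pvKeep m p1 p2 (fx i) (fy j))) := by
  induction is generalizing acc with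
  | nil => simp
  | cons i is ih =>
    simp only [List.foldl_cons]
    rw [pv_inner_eq m p1 p2 (fx i) fy js acc, ih, List.flatMap_cons, List.append_assoc]

-- B's recursion is a filterMap over the remaining linear indices.
theorem pv_go_eq (m : List (List Int)) (b p1 p2 : Int × Int) (n : Nat) (hn : n ≤ 9) :
    pvGo m b (PySem.Set.ofList [p1.1, p2.1]) (PySem.Set.ofList [p1.2, p2.2]) n
    = (List.range' (9 - n) n).filterMap (fun k =>
        pvKeep m p1 p2 ((b.1 - 1) * 3 + ((k / 3 : Nat) + 1 : Int))
          ((b.2 - 1) * 3 + ((k % 3 : Nat) + 1 : Int))) := by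
  induction n with
  | zero => simp [pvGo]
  | succ n ih =>
    have h : List.range' (9 - (n + 1)) (n + 1) = (9 - (n + 1)) :: List.range' (9 - n) n := by
      rw [List.range'_succ, show 9 - (n + 1) + 1 = 9 - n from by omega]
    rw [h, List.filterMap_cons]
    simp only [pvGo, pv_contains_pair, ih (by omega), pvKeep, Bool.or_assoc]
    split <;> rfl

-- ===== VERDICT (by name: the statement is the Claim_ definition above) =====
theorem GetCanNotSeenInBox_spec : Claim_equal_GetCanNotSeenInBox := by
  intro m b p1 p2 _ _
  unfold Spec_GetCanNotSeenInBox GetCanNotSeenInBox GetCanNotSeenInBox_alt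
  rw [pv_go_eq m b p1 p2 9 (by omega)]
  have h := pv_outer_eq m p1 p2 (fun i => (b.1 - 1) * 3 + i) (fun j => (b.2 - 1) * 3 + j)
    (PySem.List.pyRange 1 4 1) (PySem.List.pyRange 1 4 1) []
  rw [h]
  rw [show PySem.List.pyRange 1 4 1 = [1, 2, 3] from by decide]
  rw [show List.range' (9 - 9) 9 = [0, 1, 2] ++ [3, 4, 5] ++ [6, 7, 8] from by decide]
  rw [List.filterMap_append, List.filterMap_append]
  norm_num [List.flatMap_cons, List.flatMap_nil, List.filterMap_cons, List.filterMap_nil,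
    List.append_assoc]
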